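-- pv_equiv track=rewrite | github.com/jahboukie/innerarchitect | performance/performance_suite.py | _should_compress_content_type
-- ===== SOURCE A (Python) =====
-- def _should_compress_content_type(content_type: str) -> bool:
--     """
--     Check if content type should be compressed.
--
--     Args:
--         content_type: HTTP Content-Type header
--
--     Returns:
--         True if content should be compressed, False otherwise
--     """
--     compressible_types = {
--         "text/",
--         "application/json",
--         "application/javascript",
--         "application/xml",
--         "application/xhtml+xml",
--         "image/svg+xml",
--         "application/rss+xml",
--         "application/atom+xml"
--     }
--
--     return any(ct in content_type for ct in compressible_types)
-- ===== SOURCE B (Python) =====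
-- def _should_compress_content_type(content_type: str) -> bool:
--     """Single left-to-right scan: at each position test the tuple of fixed
--     markers as prefixes (str.startswith accepts a tuple), instead of running
--     a separate substring search for each marker."""
--     markers = (
--         "text/",
--         "application/json",
--         "application/javascript",
--         "application/xml",
--         "application/xhtml+xml",
--         "image/svg+xml",
--         "application/rss+xml",
--         "application/atom+xml",
--     )
--     for i in range(len(content_type)):
--         if content_type.startswith(markers, i):
--             return True
--     return False
-- ===== Notes on version B (the rewrite author's own statement) =====
-- stated objective: alternative
-- what changed: A runs a separate substring search for each of the 8 markers; B makes one left-to-right pass over the string, testing the tuple of markers as prefixes at each position via str.startswith(tuple, i) (a different traversal of similar asymptotic cost; the Python-level position loop trades C-level speed for a single scan).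
import Mathlib
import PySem

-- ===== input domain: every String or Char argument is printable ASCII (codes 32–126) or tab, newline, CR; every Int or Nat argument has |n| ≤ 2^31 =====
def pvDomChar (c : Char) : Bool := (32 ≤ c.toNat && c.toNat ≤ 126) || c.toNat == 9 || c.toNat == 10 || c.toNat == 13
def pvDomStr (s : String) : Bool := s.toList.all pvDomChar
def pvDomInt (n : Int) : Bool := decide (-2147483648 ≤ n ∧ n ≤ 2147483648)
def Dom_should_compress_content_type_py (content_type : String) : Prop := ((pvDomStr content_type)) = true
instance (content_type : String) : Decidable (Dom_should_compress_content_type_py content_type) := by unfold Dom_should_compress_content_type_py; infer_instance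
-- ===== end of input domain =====

-- B replaces eight separate substring searches by one left-to-right scan that
-- tests the fixed markers as prefixes at each position (simpler single pass;
-- no speed claim).

-- ===== PORT A =====
-- the Python set literal `compressible_types` (distinct elements, so ofList keeps all)
def pvCompressibleTypes : PySem.Set String := PySem.Set.ofList
  [ "text/",
    "application/json",
    "application/javascript",
    "application/xml",
    "application/xhtml+xml",
    "image/svg+xml",
    "application/rss+xml",
    "application/atom+xml" ]

-- any(ct in content_type for ct in compressible_types)
def should_compress_content_type_py (content_type : String) : Bool :=
  pvCompressibleTypes.any (fun ct => PySem.Str.isIn ct content_type)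

-- ===== PORT B =====
-- B's tuple `markers`
def pvMarkersB : List String :=
  [ "text/",
    "application/json",
    "application/javascript",
    "application/xml",
    "application/xhtml+xml",
    "image/svg+xml",
    "application/rss+xml",
    "application/atom+xml" ]

-- the loop `for i in range(len(content_type)): if content_type.startswith(markers, i): return True`,
-- as structural recursion over the suffix starting at position i;
-- `content_type.startswith(markers, i)` is the tuple-prefix test at that suffix (exact:
-- startswith with a tuple is True iff some member is a prefix there).
def pvScanB : List Char → Bool
  | [] => false
  | c :: t =>
    if pvMarkersB.any (fun m => PySem.Chars.startswith (c :: t) m.toList) then true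
    else pvScanB t

def should_compress_content_type_py_alt (content_type : String) : Bool :=
  pvScanB content_type.toList

-- ===== PRECONDITION & SPEC =====
def Spec_should_compress_content_type_py (content_type : String) (out : Bool) : Prop := out = should_compress_content_type_py_alt content_type
instance (content_type : String) (out : Bool) : Decidable (Spec_should_compress_content_type_py content_type out) := by unfold Spec_should_compress_content_type_py; infer_instance

-- ===== CLAIM (what is proved, stated in full; the proofs are below) =====
def Claim_equal_should_compress_content_type_py : Prop := ∀ (content_type : String), Dom_should_compress_content_type_py content_type → Spec_should_compress_content_type_py content_type (should_compress_content_type_py content_type)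

-- ===== LEMMAS AND PROOFS =====

-- B's position scan finds exactly the strings having some marker as an infix
theorem pvScanB_iff (cs : List Char) :
    pvScanB cs = true ↔ ∃ m ∈ pvMarkersB, m.toList <:+: cs := by
  induction cs with
  | nil =>
    simp only [pvScanB, List.infix_nil]
    constructor
    · intro h; exact absurd h (by decide)
    · rintro ⟨m, hm, h⟩
      exfalso
      fin_cases hm <;> simp_all
  | cons c t ih =>
    simp only [pvScanB]
    split
    · rename_i h
      simp only [List.any_eq_true] at h
      obtain ⟨m, hm, hp⟩ := h
      rw [PySem.Chars.startswith_iff] at hp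
      simp only [true_iff]
      exact ⟨m, hm, hp.isInfix⟩
    · rename_i h
      rw [ih]
      constructor
      · rintro ⟨m, hm, hi⟩
        exact ⟨m, hm, List.infix_cons hi⟩
      · rintro ⟨m, hm, hi⟩
        rcases List.infix_cons_iff.mp hi with hp | hi'
        · exfalso
          apply h
          simp only [List.any_eq_true]
          exact ⟨m, hm, by rw [PySem.Chars.startswith_iff]; exact hp⟩
        · exact ⟨m, hm, hi'⟩

theorem pvSet_eq : pvCompressibleTypes = pvMarkersB := by decide

theorem should_compress_content_type_py_spec : Claim_equal_should_compress_content_type_py := by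
  intro content_type _
  show should_compress_content_type_py content_type = should_compress_content_type_py_alt content_type
  rw [Bool.eq_iff_iff]
  unfold should_compress_content_type_py should_compress_content_type_py_alt
  rw [pvSet_eq, pvScanB_iff, List.any_eq_true]
  constructor
  · rintro ⟨m, hm, h⟩
    exact ⟨m, hm, (PySem.Str.isIn_iff_infix m content_type).mp h⟩
  · rintro ⟨m, hm, h⟩
    exact ⟨m, hm, (PySem.Str.isIn_iff_infix m content_type).mpr h⟩
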